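-- pv_equiv track=rewrite | github.com/someguy599/USACO-Silver-Basic-B | Class 5/unfriendlyfriends.py | minimum_photos
-- ===== SOURCE A (Python) =====
-- def minimum_photos(n, pairs):
--     pairs = [(min(a, b), max(a, b)) for a, b in pairs]
--     cnt = 0
--     left = 1
--
--     while left <= n:
--         right = n
--         for a, b in pairs:
--             if left <= a and right >= b:
--                 right = b - 1
--
--         cnt += 1
--         left = right + 1
--
--     return cnt
-- ===== SOURCE B (Python) =====
-- def minimum_photos(n, pairs):
--     # Sort the normalized pairs (keeping only those with upper end <= n) by their
--     # lower end, precompute suffix minima of the upper ends, then sweep the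
--     # segments left-to-right with an amortized pointer, instead of rescanning
--     # every pair for every segment.
--     norm = sorted(((a, b) if a <= b else (b, a)) for a, b in pairs if max(a, b) <= n)
--     ann = []
--     m = n + 1
--     for lo, hi in reversed(norm):
--         m = min(m, hi)
--         ann.append((lo, m))
--     ann.reverse()  # ann[i] = (lo_i, min of hi over norm[i:]), with n+1 as "empty" value
--     cnt = 0
--     left = 1
--     idx = 0
--     while left <= n:
--         while idx < len(ann) and ann[idx][0] < left:
--             idx += 1
--         left = ann[idx][1] if idx < len(ann) else n + 1
--         cnt += 1
--     return cnt
-- ===== Notes on version B (the rewrite author's own statement) =====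
-- stated objective: alternative
-- what changed: Instead of rescanning all pairs for every segment with a stateful 'right' variable, B sorts the normalized pairs (dropping those with upper end > n) by lower end once, precomputes suffix minima of the upper ends, and answers each segment's minimum query from that table with an amortized forward pointer.
import Mathlib
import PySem

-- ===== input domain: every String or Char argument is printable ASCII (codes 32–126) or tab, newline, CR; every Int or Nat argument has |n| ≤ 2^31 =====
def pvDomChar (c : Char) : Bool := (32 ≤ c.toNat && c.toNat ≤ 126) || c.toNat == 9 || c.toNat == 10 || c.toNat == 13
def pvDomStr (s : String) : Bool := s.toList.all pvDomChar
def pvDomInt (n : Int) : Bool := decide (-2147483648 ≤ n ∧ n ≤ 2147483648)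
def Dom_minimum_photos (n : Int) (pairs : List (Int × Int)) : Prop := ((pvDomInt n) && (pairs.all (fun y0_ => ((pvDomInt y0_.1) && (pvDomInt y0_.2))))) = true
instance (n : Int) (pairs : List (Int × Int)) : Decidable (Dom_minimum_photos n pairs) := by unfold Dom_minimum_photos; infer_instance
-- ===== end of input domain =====

-- B sorts the normalized pairs once and answers each segment's query from a
-- suffix-minimum table with an amortized pointer, instead of A's rescan of all
-- pairs for every segment (objective: alternative algorithm).

-- ===== PORT A =====
-- the body of A's inner `for` loop over the normalized pairs
def pvStepA (left r : Int) (p : Int × Int) : Int :=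
  if left ≤ p.1 ∧ r ≥ p.2 then p.2 - 1 else r

-- A's `while left <= n` loop, with fuel n.toNat + 1 (when the Python loop
-- terminates it runs at most n times, so the fuel is never exhausted)
def pvLoopA (n : Int) (ps : List (Int × Int)) : Nat → Int → Int → Int
  | 0, _, cnt => cnt
  | fuel + 1, left, cnt =>
    if left ≤ n then
      pvLoopA n ps fuel ((ps.foldl (pvStepA left) n) + 1) (cnt + 1)
    else cnt

def minimum_photos (n : Int) (pairs : List (Int × Int)) : Int :=
  pvLoopA n (pairs.map (fun p => (min p.1 p.2, max p.1 p.2))) (n.toNat + 1) 1 0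

-- ===== PORT B =====
-- Python's tuple comparison for `sorted` on pairs (lexicographic)
def pvLe (p q : Int × Int) : Bool := decide (p.1 < q.1) || (decide (p.1 = q.1) && decide (p.2 ≤ q.2))

-- `sorted(((a,b) if a<=b else (b,a)) for a,b in pairs if max(a,b) <= n)`
def pvSortedNorm (n : Int) (pairs : List (Int × Int)) : List (Int × Int) :=
  ((pairs.filter (fun p => decide (max p.1 p.2 ≤ n))).map
      (fun p => if p.1 ≤ p.2 then p else (p.2, p.1))).mergeSort pvLe

-- the reversed-append-then-reverse construction of `ann`; the Lean accumulator
-- conses, representing Python's `ann` reversed, so the final `reverse` is a no-op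
def pvBuildAnn (n : Int) (s : List (Int × Int)) : List (Int × Int) :=
  (s.reverse.foldl
      (fun (st : Int × List (Int × Int)) p =>
        (min st.1 p.2, (p.1, min st.1 p.2) :: st.2))
      (n + 1, ([] : List (Int × Int)))).2

-- the inner `while idx < len(ann) and ann[idx][0] < left: idx += 1` pointer
-- advance; the suffix `ann[idx:]` is represented by the remaining list
def pvAdvance (left : Int) (rem : List (Int × Int)) : List (Int × Int) :=
  rem.dropWhile (fun p => decide (p.1 < left))

-- B's `while left <= n` loop, same fuel as A's port
def pvLoopB (n : Int) : Nat → Int → Int → List (Int × Int) → Int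
  | 0, _, cnt, _ => cnt
  | fuel + 1, left, cnt, rem =>
    if left ≤ n then
      let rem' := pvAdvance left rem
      pvLoopB n fuel (match rem' with | [] => n + 1 | q :: _ => q.2) (cnt + 1) rem'
    else cnt

def minimum_photos_alt (n : Int) (pairs : List (Int × Int)) : Int :=
  pvLoopB n (n.toNat + 1) 1 0 (pvBuildAnn n (pvSortedNorm n pairs))

-- ===== PRECONDITION & SPEC =====
-- (no Pre_: the ports agree on every input; on inputs holding a pair (v, v) with
-- 1 <= v <= n both Pythons loop forever, so nothing is claimed about values there)
def Spec_minimum_photos (n : Int) (pairs : List (Int × Int)) (out : Int) : Prop := out = minimum_photos_alt n pairs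
instance (n : Int) (pairs : List (Int × Int)) (out : Int) : Decidable (Spec_minimum_photos n pairs out) := by unfold Spec_minimum_photos; infer_instance

-- ===== CLAIM (what is proved, stated in full; the proofs are below) =====
def Claim_equal_minimum_photos : Prop := ∀ (n : Int) (pairs : List (Int × Int)), Dom_minimum_photos n pairs → Spec_minimum_photos n pairs (minimum_photos n pairs)

-- ===== LEMMAS AND PROOFS =====

-- the value A's inner fold computes, plus one: the minimum upper end among the
-- applicable pairs, with n+1 when none applies
def pvMinB (left n : Int) (l : List (Int × Int)) : Int :=
  ((l.filter (fun p => decide (left ≤ p.1) && decide (p.2 ≤ n))).map (·.2)).foldr min (n + 1)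

-- specification of the annotated list: each element keeps its lower end and the
-- minimum upper end of its suffix (base n+1)
def pvAnnSpec (n : Int) : List (Int × Int) → List (Int × Int)
  | [] => []
  | p :: t => (p.1, (((p :: t).map (·.2)).foldr min (n + 1))) :: pvAnnSpec n t

theorem pvFoldA_le (left : Int) : ∀ (l : List (Int × Int)) (r : Int), l.foldl (pvStepA left) r ≤ r := by
  intro l
  induction l with
  | nil => intro r; simp
  | cons p t ih =>
    intro r
    simp only [List.foldl_cons, pvStepA]
    split
    · have := ih (p.2 - 1); omega
    · exact ih r

theorem pvFoldA_min (left : Int) : ∀ (l : List (Int × Int)) (r₁ r₂ : Int), r₁ ≤ r₂ →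
    l.foldl (pvStepA left) r₁ = min r₁ (l.foldl (pvStepA left) r₂) := by
  intro l
  induction l with
  | nil => intro r₁ r₂ h; simp; omega
  | cons p t ih =>
    intro r₁ r₂ h
    simp only [List.foldl_cons, pvStepA]
    split_ifs with h1 h2 h2
    · have := pvFoldA_le left t (p.2 - 1)
      omega
    · exact absurd ⟨h1.1, by omega⟩ h2
    · exact ih r₁ (p.2 - 1) (by omega)
    · exact ih r₁ r₂ h

theorem pvFoldA_eq (left n : Int) : ∀ (l : List (Int × Int)),
    l.foldl (pvStepA left) n = pvMinB left n l - 1 := by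
  intro l
  induction l with
  | nil => simp [pvMinB]
  | cons p t ih =>
    simp only [List.foldl_cons, pvStepA, pvMinB, List.filter_cons]
    by_cases hc : left ≤ p.1 ∧ p.2 ≤ n
    · have hbr : left ≤ p.1 ∧ n ≥ p.2 := ⟨hc.1, by omega⟩
      rw [if_pos hbr]
      have h1 := pvFoldA_min left t (p.2 - 1) n (by omega)
      rw [h1, ih]
      simp only [hc.1, hc.2, decide_true, Bool.and_self, if_pos, List.map_cons, List.foldr_cons]
      unfold pvMinB
      omega
    · have hbr : ¬ (left ≤ p.1 ∧ n ≥ p.2) := by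
        intro h; exact hc ⟨h.1, by omega⟩
      rw [if_neg hbr, ih]
      have : (decide (left ≤ p.1) && decide (p.2 ≤ n)) = false := by
        rcases not_and_or.mp hc with h | h <;> simp [h]
      rw [this]
      simp [pvMinB]

theorem pvBuild_eq (n : Int) : ∀ (s : List (Int × Int)),
    s.reverse.foldl
      (fun (st : Int × List (Int × Int)) p =>
        (min st.1 p.2, (p.1, min st.1 p.2) :: st.2))
      (n + 1, ([] : List (Int × Int)))
    = ((s.map (·.2)).foldr min (n + 1), pvAnnSpec n s) := by
  intro s
  induction s with
  | nil => simp [pvAnnSpec]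
  | cons p t ih =>
    simp only [List.reverse_cons, List.foldl_append, ih, List.foldl_cons, List.foldl_nil,
      pvAnnSpec, List.map_cons, List.foldr_cons]
    rw [min_comm]

theorem pvAnn_dropWhile (n left : Int) : ∀ (s : List (Int × Int)),
    (pvAnnSpec n s).dropWhile (fun p => decide (p.1 < left))
      = pvAnnSpec n (s.dropWhile (fun p => decide (p.1 < left))) := by
  intro s
  induction s with
  | nil => simp [pvAnnSpec]
  | cons p t ih =>
    simp only [pvAnnSpec, List.dropWhile_cons]
    by_cases h : p.1 < left
    · simp [h, ih]
    · simp [h, pvAnnSpec]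

theorem pvDropWhile_filter (left : Int) : ∀ (l : List (Int × Int)),
    l.Pairwise (fun p q => p.1 ≤ q.1) →
    l.dropWhile (fun p => decide (p.1 < left)) = l.filter (fun p => decide (left ≤ p.1)) := by
  intro l
  induction l with
  | nil => simp
  | cons p t ih =>
    intro hp
    rw [List.pairwise_cons] at hp
    simp only [List.dropWhile_cons, List.filter_cons]
    by_cases h : p.1 < left
    · have : ¬ left ≤ p.1 := by omega
      simp [h, this, ih hp.2]
    · have hle : left ≤ p.1 := by omega
      simp only [h, decide_false, Bool.false_eq_true, if_false, hle, decide_true, if_pos]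
      rw [List.filter_eq_self.mpr]
      intro q hq
      have := hp.1 q hq
      simp; omega

theorem pvDropWhile_comp (t1 t2 : Int) (h : t1 ≤ t2) : ∀ (l : List (Int × Int)),
    (l.dropWhile (fun p => decide (p.1 < t1))).dropWhile (fun p => decide (p.1 < t2))
      = l.dropWhile (fun p => decide (p.1 < t2)) := by
  intro l
  induction l with
  | nil => simp
  | cons p t ih =>
    simp only [List.dropWhile_cons]
    by_cases h1 : p.1 < t1
    · have h2 : p.1 < t2 := by omega
      simp [h1, h2, ih]
    · simp [h1, List.dropWhile_cons]

theorem pvFoldrMin_ge (left base : Int) (hb : left ≤ base) : ∀ (L : List Int),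
    (∀ x ∈ L, left ≤ x) → left ≤ L.foldr min base := by
  intro L
  induction L with
  | nil => simpa
  | cons x t ih =>
    intro h
    simp only [List.foldr_cons, le_min_iff]
    exact ⟨h x (by simp), ih (fun y hy => h y (by simp [hy]))⟩

theorem pvSorted_fst (n : Int) (pairs : List (Int × Int)) :
    (pvSortedNorm n pairs).Pairwise (fun p q => p.1 ≤ q.1) := by
  have htrans : ∀ (a b c : Int × Int), pvLe a b = true → pvLe b c = true → pvLe a c = true := by
    intro a b c hab hbc
    simp only [pvLe, Bool.or_eq_true, Bool.and_eq_true, decide_eq_true_eq] at *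
    omega
  have htotal : ∀ (a b : Int × Int), (pvLe a b || pvLe b a) = true := by
    intro a b
    simp only [pvLe, Bool.or_eq_true, Bool.and_eq_true, decide_eq_true_eq]
    omega
  have := List.sorted_mergeSort htrans htotal
    ((pairs.filter (fun p => decide (max p.1 p.2 ≤ n))).map
      (fun p => if p.1 ≤ p.2 then p else (p.2, p.1)))
  refine this.imp ?_
  intro p q h
  simp only [pvLe, Bool.or_eq_true, Bool.and_eq_true, decide_eq_true_eq] at h
  omega

theorem pvSorted_perm (n : Int) (pairs : List (Int × Int)) :
    (pvSortedNorm n pairs).Perm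
      ((pairs.map (fun p => (min p.1 p.2, max p.1 p.2))).filter (fun p => decide (p.2 ≤ n))) := by
  have h1 := List.mergeSort_perm
    ((pairs.filter (fun p => decide (max p.1 p.2 ≤ n))).map
      (fun p => if p.1 ≤ p.2 then p else (p.2, p.1))) pvLe
  have hfun : ∀ p : Int × Int, (if p.1 ≤ p.2 then p else (p.2, p.1)) = (min p.1 p.2, max p.1 p.2) := by
    intro p
    split <;> (refine Prod.ext ?_ ?_ <;> simp [min_def, max_def] <;> omega)
  have h2 : (pairs.map (fun p => (min p.1 p.2, max p.1 p.2))).filter (fun p => decide (p.2 ≤ n))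
      = (pairs.filter (fun p => decide (max p.1 p.2 ≤ n))).map
          (fun p => if p.1 ≤ p.2 then p else (p.2, p.1)) := by
    rw [List.filter_map]
    have : (pairs.filter ((fun p : Int × Int => decide (p.2 ≤ n)) ∘ fun p => (min p.1 p.2, max p.1 p.2)))
        = pairs.filter (fun p => decide (max p.1 p.2 ≤ n)) := by
      apply List.filter_congr; intro p _; simp
    rw [this]
    apply List.map_congr_left
    intro p _
    exact (hfun p).symm
  rw [h2]
  exact h1

-- the per-segment value B reads off equals the value pvMinB that A's fold computes, plus one
theorem pvValue_eq (n left : Int) (pairs : List (Int × Int)) :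
    (match pvAdvance left (pvAnnSpec n (pvSortedNorm n pairs)) with
      | [] => n + 1 | q :: _ => q.2)
    = pvMinB left n (pairs.map (fun p => (min p.1 p.2, max p.1 p.2))) := by
  unfold pvAdvance
  rw [pvAnn_dropWhile, pvDropWhile_filter left _ (pvSorted_fst n pairs)]
  have hperm : ((pvSortedNorm n pairs).filter (fun p => decide (left ≤ p.1))).Perm
      (((pairs.map (fun p => (min p.1 p.2, max p.1 p.2))).filter
        (fun p => decide (p.2 ≤ n))).filter (fun p => decide (left ≤ p.1))) :=
    (pvSorted_perm n pairs).filter _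
  have hmin : ∀ (u v : List (Int × Int)), u.Perm v →
      ((u.map (·.2)).foldr min (n + 1)) = ((v.map (·.2)).foldr min (n + 1)) := by
    intro u v huv
    exact List.Perm.foldr_eq (lcomm := ⟨fun a b c => by omega⟩) (huv.map _) _
  have hval : ∀ (u : List (Int × Int)),
      (match pvAnnSpec n u with | [] => n + 1 | q :: _ => q.2)
        = (u.map (·.2)).foldr min (n + 1) := by
    intro u
    cases u with
    | nil => simp [pvAnnSpec]
    | cons p t => simp [pvAnnSpec]
  rw [hval, hmin _ _ hperm, List.filter_filter]
  unfold pvMinB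
  have hfc : (pairs.map (fun p => (min p.1 p.2, max p.1 p.2))).filter
        (fun p => decide (left ≤ p.1) && decide (p.2 ≤ n))
      = (pairs.map (fun p => (min p.1 p.2, max p.1 p.2))).filter
        (fun p => decide (p.2 ≤ n) && decide (left ≤ p.1)) := by
    apply List.filter_congr
    intro p _
    simp [Bool.and_comm]
  rw [hfc]

theorem pvSim (n : Int) (pairs : List (Int × Int)) : ∀ (fuel : Nat) (left cnt : Int)
    (rem : List (Int × Int)),
    pvAdvance left rem = pvAdvance left (pvAnnSpec n (pvSortedNorm n pairs)) →
    pvLoopA n (pairs.map (fun p => (min p.1 p.2, max p.1 p.2))) fuel left cnt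
      = pvLoopB n fuel left cnt rem := by
  intro fuel
  induction fuel with
  | zero => intro left cnt rem _; rfl
  | succ f ih =>
    intro left cnt rem hrem
    simp only [pvLoopA, pvLoopB]
    by_cases hln : left ≤ n
    · rw [if_pos hln, if_pos hln]
      rw [hrem]
      set ann := pvAnnSpec n (pvSortedNorm n pairs) with hann
      have hv := pvValue_eq n left pairs
      have hfold := pvFoldA_eq left n (pairs.map (fun p => (min p.1 p.2, max p.1 p.2)))
      have hstep : (pairs.map (fun p => (min p.1 p.2, max p.1 p.2))).foldl (pvStepA left) n + 1
          = (match pvAdvance left ann with | [] => n + 1 | q :: _ => q.2) := by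
        rw [hfold, hv]; omega
      rw [hstep]
      apply ih
      -- the new left is ≥ the old left, so re-dropping reaches the same suffix
      have hge : left ≤ (match pvAdvance left ann with | [] => n + 1 | q :: _ => q.2) := by
        rw [hv]
        apply pvFoldrMin_ge left (n + 1) (by omega)
        intro x hx
        simp only [List.mem_map, List.mem_filter, Bool.and_eq_true, decide_eq_true_eq] at hx
        obtain ⟨p, ⟨hpm, hp1, _⟩, rfl⟩ := hx
        obtain ⟨q, _, rfl⟩ := hpm
        simp only [] at hp1 ⊢
        omega
      unfold pvAdvance
      exact pvDropWhile_comp left _ hge _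
    · rw [if_neg hln, if_neg hln]

-- ===== VERDICT (by name: the statement is the Claim_ definition above) =====
theorem minimum_photos_spec : Claim_equal_minimum_photos := by
  intro n pairs _
  unfold Spec_minimum_photos minimum_photos minimum_photos_alt
  rw [pvBuildAnn, pvBuild_eq]
  exact pvSim n pairs (n.toNat + 1) 1 0 _ rfl
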